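-- pv_equiv track=rewrite | github.com/cutehammond772/problem-solving-archive | 백준/Gold/30015. 학생회 뽑기/학생회 뽑기.py | solve
-- ===== SOURCE A (Python) =====
-- def solve(N, K, Q):
--   memo = [[] for _ in range(20)]
--
--   # 특정 1의 자리수의 존재 여부 확인
--   for num in Q:
--     for i in range(20):
--       if num & (1 << i):
--         memo[i].append(num)
--
--   # 가장 높은 자리수부터 확인
--   for x in range(19, -1, -1):
--     if len(memo[x]) < K:
--       continue
--
--     result = 1 << x
--     current = memo[x]
--
--     for y in range(x - 1, -1, -1):
--       next = [t for t in current if t & (1 << y)]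
--
--       if len(next) >= K:
--         result |= 1 << y
--         current = next
--
--     return result
--
--   return 0
-- ===== SOURCE B (Python) =====
-- def solve(N, K, Q):
--     cand = 0
--     for bit in range(19, -1, -1):
--         trial = cand | (1 << bit)
--         if sum(1 for t in Q if t & trial == trial) >= K:
--             cand = trial
--     return cand
-- ===== Notes on version B (the rewrite author's own statement) =====
-- stated objective: simpler
-- what changed: Replaced A's per-bit memo lists and shrinking-candidate-list refinement with a listless greedy: grow one candidate mask and, for each bit, count in the original Q the numbers that are bitwise supersets of the trial mask.
import Mathlib
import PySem

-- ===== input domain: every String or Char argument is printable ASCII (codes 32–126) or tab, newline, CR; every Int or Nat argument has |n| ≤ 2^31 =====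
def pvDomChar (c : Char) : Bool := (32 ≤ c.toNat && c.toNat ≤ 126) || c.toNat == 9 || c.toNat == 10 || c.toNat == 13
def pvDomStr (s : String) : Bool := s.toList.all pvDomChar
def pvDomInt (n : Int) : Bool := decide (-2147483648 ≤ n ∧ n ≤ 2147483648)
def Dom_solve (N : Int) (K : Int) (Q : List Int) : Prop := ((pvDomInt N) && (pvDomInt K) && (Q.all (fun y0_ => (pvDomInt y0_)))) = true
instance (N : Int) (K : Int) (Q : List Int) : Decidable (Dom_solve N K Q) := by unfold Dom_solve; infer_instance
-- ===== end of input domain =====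

-- B drops A's per-bit memo lists and list refinement entirely: it grows one candidate
-- mask and, per bit, counts in the ORIGINAL Q the numbers that are bitwise supersets
-- of the trial mask (objective: simpler — no intermediate lists at all).

-- ===== PORT A =====
-- body of the inner 'for i in range(20): if num & (1 << i): memo[i].append(num)'
def solveMemoStep (num : Int) (m : List (List Int)) (i : Nat) : List (List Int) :=
  if PySem.Int.band num ((1:Int) <<< i) != 0 then m.set i ((m.getD i []) ++ [num]) else m

def solveMemoInner (num : Int) (m : List (List Int)) : List (List Int) :=
  (List.range 20).foldl (solveMemoStep num) m

-- 'memo = [[] for _ in range(20)]; for num in Q: …'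
def solveMemo (Q : List Int) : List (List Int) :=
  Q.foldl (fun m num => solveMemoInner num m) (List.replicate 20 [])

-- inner 'for y in range(x-1,-1,-1): …' refinement loop of A
def solveRefine (K : Int) : Nat → Int → List Int → Int
  | 0, res, _ => res
  | y + 1, res, cur =>
    let next := cur.filter (fun t => PySem.Int.band t ((1:Int) <<< y) != 0)
    if K ≤ (next.length : Int) then
      solveRefine K y (PySem.Int.bor res ((1:Int) <<< y)) next
    else
      solveRefine K y res cur

-- outer 'for x in range(19,-1,-1): …; return result' with the final 'return 0'
def solveScan (K : Int) (memo : List (List Int)) : Nat → Int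
  | 0 => 0
  | x + 1 =>
    if ((memo.getD x []).length : Int) < K then solveScan K memo x
    else solveRefine K x ((1:Int) <<< x) (memo.getD x [])

def solve (N : Int) (K : Int) (Q : List Int) : Int :=
  solveScan K (solveMemo Q) 20

-- ===== PORT B =====
-- 'for bit in range(19,-1,-1): trial = cand | (1 << bit);
--    if sum(1 for t in Q if t & trial == trial) >= K: cand = trial'
def solveAltGo (K : Int) (Q : List Int) : Nat → Int → Int
  | 0, cand => cand
  | b + 1, cand =>
    let trial := PySem.Int.bor cand ((1:Int) <<< b)
    if K ≤ ((Q.countP (fun t => PySem.Int.band t trial == trial)) : Int) then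
      solveAltGo K Q b trial
    else
      solveAltGo K Q b cand

def solve_alt (N : Int) (K : Int) (Q : List Int) : Int :=
  solveAltGo K Q 20 0

-- ===== PRECONDITION & SPEC =====
def Spec_solve (N : Int) (K : Int) (Q : List Int) (out : Int) : Prop := out = solve_alt N K Q
instance (N : Int) (K : Int) (Q : List Int) (out : Int) : Decidable (Spec_solve N K Q out) := by unfold Spec_solve; infer_instance

-- ===== CLAIM (what is proved, stated in full; the proofs are below) =====
def Claim_equal_solve : Prop := ∀ (N : Int) (K : Int) (Q : List Int), Dom_solve N K Q → Spec_solve N K Q (solve N K Q)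

-- ===== LEMMAS AND PROOFS =====

-- Python's two's-complement test of bit i of an arbitrary Int.
def intBit (t : Int) (i : Nat) : Bool :=
  if 0 ≤ t then t.toNat.testBit i else !((-t - 1).toNat.testBit i)

theorem nat_and_eq_right (n m : Nat) :
    n &&& m = m ↔ ∀ i, m.testBit i = true → n.testBit i = true := by
  constructor
  · intro h i hi
    have := congrArg (fun x => x.testBit i) h
    simp only [Nat.testBit_and, hi, Bool.and_true] at this
    exact this
  · intro h
    apply Nat.eq_of_testBit_eq
    intro i
    rw [Nat.testBit_and]
    cases hm : m.testBit i with
    | false => simp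
    | true => simp [h i hm]

theorem nat_and_eq_zero (m u : Nat) :
    m &&& u = 0 ↔ ∀ i, m.testBit i = true → u.testBit i = false := by
  constructor
  · intro h i hi
    have := congrArg (fun x => x.testBit i) h
    simp only [Nat.testBit_and, Nat.zero_testBit, hi, Bool.true_and] at this
    exact this
  · intro h
    apply Nat.eq_of_testBit_eq
    intro i
    rw [Nat.testBit_and, Nat.zero_testBit]
    cases hm : m.testBit i with
    | false => simp
    | true => simp [h i hm]

-- band t m = m  (m a nonnegative mask) ↔ every set bit of m is set in t.
theorem band_mask_iff (t : Int) (m : Nat) :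
    PySem.Int.band t (m : Int) = (m : Int) ↔ ∀ i, m.testBit i = true → intBit t i = true := by
  unfold PySem.Int.band intBit
  by_cases ht : 0 ≤ t
  · simp only [ht, if_pos, Int.toNat_natCast, Int.natCast_inj,
      if_pos (by positivity : (0:Int) ≤ (m:Int))]
    exact nat_and_eq_right t.toNat m
  · simp only [ht, if_false, if_pos (by positivity : (0:Int) ≤ (m:Int)),
      Int.toNat_natCast]
    have hle : m &&& (-t - 1).toNat ≤ m := Nat.and_le_left
    constructor
    · intro h i hi
      have h' : m - (m &&& (-t - 1).toNat) = m := by exact_mod_cast h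
      have hz : m &&& (-t - 1).toNat = 0 := by omega
      simpa using (nat_and_eq_zero m _).mp hz i hi
    · intro h
      have hz : m &&& (-t - 1).toNat = 0 :=
        (nat_and_eq_zero m _).mpr (fun i hi => by simpa using h i hi)
      rw [hz]
      simp

-- band t 2^b ≠ 0 ↔ bit b of t is set.
theorem band_pow_iff (t : Int) (b : Nat) :
    PySem.Int.band t ((2 ^ b : Nat) : Int) ≠ 0 ↔ intBit t b = true := by
  unfold PySem.Int.band intBit
  by_cases ht : 0 ≤ t
  · simp only [ht, if_pos, Int.toNat_natCast,
      if_pos (by positivity : (0:Int) ≤ ((2 ^ b : Nat) : Int))]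
    rw [Nat.and_two_pow]
    cases h : t.toNat.testBit b <;> simp
  · simp only [ht, if_false, if_pos (by positivity : (0:Int) ≤ ((2 ^ b : Nat) : Int)),
      Int.toNat_natCast]
    rw [Nat.and_comm, Nat.and_two_pow]
    cases h : (-t - 1).toNat.testBit b <;> simp

-- splitting a trial mask: t ⊇ r ∪ {bit b}  ↔  t ⊇ r and t has bit b.
theorem band_trial_iff (t : Int) (r b : Nat) :
    PySem.Int.band t ((r ||| 2 ^ b : Nat) : Int) = ((r ||| 2 ^ b : Nat) : Int) ↔
      (PySem.Int.band t (r : Int) = (r : Int) ∧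
        PySem.Int.band t ((2 ^ b : Nat) : Int) ≠ 0) := by
  rw [band_mask_iff, band_mask_iff, band_pow_iff]
  constructor
  · intro h
    refine ⟨fun i hi => h i (by simp [Nat.testBit_or, hi]), h b ?_⟩
    simp [Nat.testBit_or]
  · rintro ⟨h1, h2⟩ i hi
    rw [Nat.testBit_or, Bool.or_eq_true] at hi
    rcases hi with hi | hi
    · exact h1 i hi
    · rw [Nat.testBit_two_pow] at hi
      exact (of_decide_eq_true hi) ▸ h2

theorem one_shl (b : Nat) : (1:Int) <<< b = ((2 ^ b : Nat) : Int) := by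
  rw [Int.shiftLeft_eq]; push_cast; ring

-- ===== (memo lemmas for port A, as in the straightforward reading of A) =====

theorem getD_set_self_aux (l : List (List Int)) (i : Nat) (h : i < l.length) (a : List Int) :
    (l.set i a).getD i [] = a := by
  simp [List.getD, List.getElem?_set_self h]

theorem getD_set_ne_aux (l : List (List Int)) (i j : Nat) (h : i ≠ j) (a : List Int) :
    (l.set i a).getD j [] = l.getD j [] := by
  simp [List.getD, List.getElem?_set_ne h]

theorem foldlStep_length (num : Int) (n : Nat) (m : List (List Int)) :
    ((List.range n).foldl (solveMemoStep num) m).length = m.length := by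
  induction n with
  | zero => rfl
  | succ n ih =>
    rw [List.range_succ, List.foldl_append, List.foldl_cons, List.foldl_nil]
    cases hb : (PySem.Int.band num ((1:Int) <<< n) != 0) with
    | false => rw [solveMemoStep, if_neg (by simp [hb])]; exact ih
    | true => rw [solveMemoStep, if_pos hb, List.length_set]; exact ih

theorem foldlStep_getD (num : Int) (n : Nat) (m : List (List Int)) (j : Nat)
    (hj : j < m.length) :
    ((List.range n).foldl (solveMemoStep num) m).getD j [] =
      if (PySem.Int.band num ((1:Int) <<< j) != 0) ∧ j < n
      then m.getD j [] ++ [num] else m.getD j [] := by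
  induction n with
  | zero => simp
  | succ n ih =>
    rw [List.range_succ, List.foldl_append, List.foldl_cons, List.foldl_nil]
    cases hb : (PySem.Int.band num ((1:Int) <<< n) != 0) with
    | false =>
      rw [solveMemoStep, if_neg (by simp [hb]), ih]
      by_cases hjn : j = n
      · subst hjn
        rw [if_neg (by rintro ⟨_, h⟩; omega), if_neg (by rintro ⟨h, _⟩; simp [hb] at h)]
      · exact if_congr (by constructor <;> (rintro ⟨a, b⟩; exact ⟨a, by omega⟩)) rfl rfl
    | true =>
      rw [solveMemoStep, if_pos hb]
      by_cases hjn : j = n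
      · subst hjn
        rw [getD_set_self_aux _ _ (by rw [foldlStep_length]; exact hj), ih,
          if_neg (by rintro ⟨_, h⟩; omega), if_pos ⟨hb, by omega⟩]
      · rw [getD_set_ne_aux _ _ _ (by omega), ih]
        exact if_congr (by constructor <;> (rintro ⟨a, b⟩; exact ⟨a, by omega⟩)) rfl rfl

theorem memo_length (Q : List Int) : (solveMemo Q).length = 20 := by
  unfold solveMemo
  induction Q using List.reverseRecOn with
  | nil => rfl
  | append_singleton xs x ih =>
    rw [List.foldl_append, List.foldl_cons, List.foldl_nil, solveMemoInner,
      foldlStep_length, ih]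

theorem memo_getD (Q : List Int) (j : Nat) (hj : j < 20) :
    (solveMemo Q).getD j [] = Q.filter (fun t => PySem.Int.band t ((1:Int) <<< j) != 0) := by
  induction Q using List.reverseRecOn with
  | nil => interval_cases j <;> rfl
  | append_singleton xs x ih =>
    have h1 : solveMemo (xs ++ [x]) = solveMemoInner x (solveMemo xs) := by
      unfold solveMemo
      rw [List.foldl_append, List.foldl_cons, List.foldl_nil]
    rw [h1, solveMemoInner, foldlStep_getD x 20 _ j (by rw [memo_length]; exact hj), ih,
      List.filter_append, List.filter_singleton]
    cases hb : (PySem.Int.band x ((1:Int) <<< j) != 0) with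
    | true => rw [if_pos ⟨rfl, hj⟩]; simp
    | false => rw [if_neg (by rintro ⟨h, _⟩; cases h)]; simp

-- ===== the bridge: A's list refinement computes B's superset count =====

-- A's shrinking candidate list at state (r, ·) is exactly Q filtered by "superset of r".
theorem refine_eq_altGo (K : Int) (Q : List Int) (y : Nat) (r : Nat) :
    solveRefine K y ((r : Nat) : Int)
        (Q.filter (fun t => PySem.Int.band t (r : Int) == (r : Int))) =
      solveAltGo K Q y ((r : Nat) : Int) := by
  induction y generalizing r with
  | zero => rfl
  | succ y ih =>
    have hbor : PySem.Int.bor ((r : Nat) : Int) ((1:Int) <<< y) = ((r ||| 2 ^ y : Nat) : Int) := by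
      rw [one_shl, PySem.Int.bor_natCast]
    have hfe : (Q.filter (fun t => PySem.Int.band t (r : Int) == (r : Int))).filter
          (fun t => PySem.Int.band t ((1:Int) <<< y) != 0) =
        Q.filter (fun t =>
          PySem.Int.band t ((r ||| 2 ^ y : Nat) : Int) == ((r ||| 2 ^ y : Nat) : Int)) := by
      rw [List.filter_filter]
      apply List.filter_congr
      intro t _
      rw [Bool.eq_iff_iff]
      simp only [Bool.and_eq_true, beq_iff_eq, bne_iff_ne, ne_eq, one_shl]
      rw [band_trial_iff t r y]
      tauto
    have hcount : ∀ (p : Int → Bool), ((Q.filter p).length : Int) = (Q.countP p : Int) := by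
      intro p; rw [← List.countP_eq_length_filter]
    simp only [solveRefine, solveAltGo, hbor, hfe]
    by_cases hK : K ≤ ((Q.filter (fun t =>
        PySem.Int.band t ((r ||| 2 ^ y : Nat) : Int) == ((r ||| 2 ^ y : Nat) : Int))).length : Int)
    · rw [if_pos hK, if_pos (by rwa [← hcount])]
      exact ih (r ||| 2 ^ y)
    · rw [if_neg hK, if_neg (by rwa [← hcount])]
      exact ih r

-- a single-bit mask is hit iff the AND with it is nonzero
theorem filter_pow_eq (Q : List Int) (b : Nat) :
    Q.filter (fun t => PySem.Int.band t ((1:Int) <<< b) != 0) =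
      Q.filter (fun t =>
        PySem.Int.band t ((2 ^ b : Nat) : Int) == ((2 ^ b : Nat) : Int)) := by
  apply List.filter_congr
  intro t _
  rw [Bool.eq_iff_iff]
  simp only [beq_iff_eq, bne_iff_ne, ne_eq, one_shl]
  rw [band_mask_iff, ← ne_eq, band_pow_iff]
  constructor
  · intro h i hi
    rw [Nat.testBit_two_pow] at hi
    exact (of_decide_eq_true hi) ▸ h
  · intro h
    exact h b (by simp)

theorem scan_eq_altGo (K : Int) (Q : List Int) (b : Nat) (hb : b ≤ 20) :
    solveScan K (solveMemo Q) b = solveAltGo K Q b 0 := by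
  induction b with
  | zero => rfl
  | succ b ih =>
    have hmem : (solveMemo Q).getD b [] =
        Q.filter (fun t => PySem.Int.band t ((1:Int) <<< b) != 0) := memo_getD Q b (by omega)
    have hbor0 : PySem.Int.bor 0 ((1:Int) <<< b) = ((2 ^ b : Nat) : Int) := by
      rw [one_shl, show (0:Int) = ((0:Nat):Int) from rfl, PySem.Int.bor_natCast, Nat.zero_or]
    have hcount : ((Q.filter (fun t =>
          PySem.Int.band t ((2 ^ b : Nat) : Int) == ((2 ^ b : Nat) : Int))).length : Int) =
        (Q.countP (fun t =>
          PySem.Int.band t ((2 ^ b : Nat) : Int) == ((2 ^ b : Nat) : Int)) : Int) := by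
      rw [← List.countP_eq_length_filter]
    simp only [solveScan, solveAltGo, hmem, filter_pow_eq, hbor0]
    by_cases hK : K ≤ ((Q.filter (fun t =>
        PySem.Int.band t ((2 ^ b : Nat) : Int) == ((2 ^ b : Nat) : Int))).length : Int)
    · rw [if_neg (by omega), if_pos (by rwa [← hcount]), one_shl]
      have := refine_eq_altGo K Q b (2 ^ b)
      exact this
    · rw [if_pos (by omega), if_neg (by rwa [← hcount])]
      exact ih (by omega)

-- ===== VERDICT (by name: the statement is the Claim_ definition above) =====
theorem solve_spec : Claim_equal_solve := by
  intro N K Q _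
  unfold Spec_solve solve solve_alt
  exact scan_eq_altGo K Q 20 (by omega)
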